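-- pv_equiv track=rewrite | github.com/dongVu1105/chessVer2 | chess_ai.py | count_doubled_pawns
-- ===== SOURCE A (Python) =====
-- def count_doubled_pawns(pawns):
--     """
--     Đếm số lượng tốt đôi (nhiều tốt trên cùng một cột)
--     """
--     columns = [col for _, col in pawns]
--     doubled_count = 0
--
--     for col in range(8):
--         pawns_in_col = columns.count(col)
--         if pawns_in_col > 1:
--             doubled_count += pawns_in_col - 1
--
--     return doubled_count
-- ===== SOURCE B (Python) =====
-- def count_doubled_pawns(pawns):
--     cols = [c for _, c in pawns if 0 <= c < 8]
--     return len(cols) - len(set(cols))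
-- ===== Notes on version B (the rewrite author's own statement) =====
-- stated objective: simpler
-- what changed: Instead of counting pawns per file and summing the excesses, B keeps the on-board columns and returns len(cols) - len(set(cols)): the doubled-pawn count is the number of pawns beyond the first on each occupied file, i.e. total minus distinct.
import Mathlib
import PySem

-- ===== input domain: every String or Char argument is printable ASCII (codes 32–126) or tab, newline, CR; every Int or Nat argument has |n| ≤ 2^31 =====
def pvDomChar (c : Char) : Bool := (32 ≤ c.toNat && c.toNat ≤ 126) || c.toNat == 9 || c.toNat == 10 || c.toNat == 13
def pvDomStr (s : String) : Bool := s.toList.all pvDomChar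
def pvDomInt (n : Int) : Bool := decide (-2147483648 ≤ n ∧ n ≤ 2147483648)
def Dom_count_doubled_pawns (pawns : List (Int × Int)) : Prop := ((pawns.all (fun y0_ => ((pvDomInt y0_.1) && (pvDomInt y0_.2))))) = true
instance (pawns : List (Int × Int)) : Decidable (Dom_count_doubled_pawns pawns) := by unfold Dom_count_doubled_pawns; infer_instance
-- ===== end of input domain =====

-- B drops A's per-file counting loop entirely: it keeps the on-board columns and returns
-- len(cols) - len(set(cols)) — total pawns minus distinct occupied files (objective: simpler).

-- ===== PORT A =====
def count_doubled_pawns (pawns : List (Int × Int)) : Int :=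
  let columns := pawns.map (fun p => p.2)
  (PySem.List.pyRange 0 8 1).foldl (fun doubled_count col =>
    let pawns_in_col : Int := (columns.count col : Int)
    if pawns_in_col > 1 then doubled_count + (pawns_in_col - 1) else doubled_count) 0

-- ===== PORT B =====
def count_doubled_pawns_alt (pawns : List (Int × Int)) : Int :=
  let cols := (pawns.map (fun p => p.2)).filter (fun c => decide (0 ≤ c) && decide (c < 8))
  (cols.length : Int) - ((PySem.Set.ofList cols).length : Int)

-- ===== PRECONDITION & SPEC =====
def Spec_count_doubled_pawns (pawns : List (Int × Int)) (out : Int) : Prop := out = count_doubled_pawns_alt pawns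
instance (pawns : List (Int × Int)) (out : Int) : Decidable (Spec_count_doubled_pawns pawns out) := by unfold Spec_count_doubled_pawns; infer_instance

-- ===== CLAIM (what is proved, stated in full; the proofs are below) =====
def Claim_equal_count_doubled_pawns : Prop := ∀ (pawns : List (Int × Int)), Dom_count_doubled_pawns pawns → Spec_count_doubled_pawns pawns (count_doubled_pawns pawns)

-- ===== LEMMAS AND PROOFS =====

-- A's contribution of column k: (count-1) when more than one pawn sits on k, else 0.
def pvFA (cols : List Int) (k : Int) : Int :=
  if (cols.count k : Int) > 1 then (cols.count k : Int) - 1 else 0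

-- A's fold is the sum of pvFA over the eight files.
theorem pvA_eq_sum (cols : List Int) (init : Int) :
    (PySem.List.pyRange 0 8 1).foldl (fun acc col =>
      let c : Int := (cols.count col : Int)
      if c > 1 then acc + (c - 1) else acc) init
    = init + ((PySem.List.pyRange 0 8 1).map (pvFA cols)).sum := by
  rw [← PySem.List.foldl_add (PySem.List.pyRange 0 8 1) (pvFA cols) init]
  apply PySem.List.foldl_congr_mem
  intro acc x _
  simp only [pvFA]
  split <;> simp

-- The sum over the eight files equals the sum of (count-1) over the distinct on-board columns.
theorem pvSum_range_eq (full cols : List Int)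
    (hc : ∀ k, 0 ≤ k → k < 8 → full.count k = cols.count k)
    (hmem : ∀ k, k ∈ cols → 0 ≤ k ∧ k < 8) :
    ((PySem.List.pyRange 0 8 1).map (pvFA full)).sum
    = ((PySem.Set.ofList cols).map (fun k => (cols.count k : Int) - 1)).sum := by
  rw [← List.sum_toFinset _ (PySem.List.nodup_pyRange_one 0 8),
      ← List.sum_toFinset _ (PySem.Set.nodup_ofList cols)]
  have hmemR : ∀ x : Int, x ∈ (PySem.List.pyRange 0 8 1).toFinset ↔ 0 ≤ x ∧ x < 8 := by
    intro x; simp [PySem.List.mem_pyRange_one]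
  have hmemS : ∀ x : Int, x ∈ (PySem.Set.ofList cols).toFinset ↔ x ∈ cols := by
    intro x; simp [PySem.Set.mem_ofList]
  have h1 : ∑ x ∈ (PySem.List.pyRange 0 8 1).toFinset ∩ (PySem.Set.ofList cols).toFinset,
      pvFA full x = ∑ x ∈ (PySem.List.pyRange 0 8 1).toFinset, pvFA full x := by
    apply Finset.sum_subset Finset.inter_subset_left
    intro x hx hnx
    have hr := (hmemR x).mp hx
    have hxc : x ∉ cols := fun hc => hnx (Finset.mem_inter.mpr ⟨hx, (hmemS x).mpr hc⟩)
    simp [pvFA, hc x hr.1 hr.2, List.count_eq_zero.mpr hxc]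
  have h2 : ∑ x ∈ (PySem.List.pyRange 0 8 1).toFinset ∩ (PySem.Set.ofList cols).toFinset,
      (fun k => (cols.count k : Int) - 1) x
      = ∑ x ∈ (PySem.Set.ofList cols).toFinset, (fun k => (cols.count k : Int) - 1) x := by
    apply Finset.sum_subset Finset.inter_subset_right
    intro x hx hnx
    exfalso
    have hr := hmem x ((hmemS x).mp hx)
    exact hnx (Finset.mem_inter.mpr ⟨(hmemR x).mpr hr, hx⟩)
  rw [← h1, ← h2]
  apply Finset.sum_congr rfl
  intro x hx
  have hr := (hmemR x).mp (Finset.mem_inter.mp hx).1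
  have hxc := (hmemS x).mp (Finset.mem_inter.mp hx).2
  have hpos : 1 ≤ cols.count x := List.one_le_count_iff.mpr hxc
  simp only [pvFA, hc x hr.1 hr.2]
  by_cases hgt : ((cols.count x : Int) > 1)
  · rw [if_pos hgt]
  · rw [if_neg hgt]
    omega

-- Σ_{k distinct} (count k - 1) = length - number of distinct elements.
theorem pvSum_counts (cols : List Int) :
    ((PySem.Set.ofList cols).map (fun k => (cols.count k : Int) - 1)).sum
    = (cols.length : Int) - ((PySem.Set.ofList cols).length : Int) := by
  rw [← List.sum_toFinset _ (PySem.Set.nodup_ofList cols)]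
  have hT : (PySem.Set.ofList cols).toFinset = cols.toFinset := by
    ext x; simp [PySem.Set.mem_ofList]
  rw [hT, Finset.sum_sub_distrib, Finset.sum_const, nsmul_eq_mul, mul_one]
  have hcnt : ∑ x ∈ cols.toFinset, (cols.count x : Int) = (cols.length : Int) := by
    rw [← Nat.cast_sum]
    have := Multiset.toFinset_sum_count_eq (↑cols : Multiset Int)
    simp only [List.toFinset_coe, Multiset.coe_count, Multiset.coe_card] at this
    exact_mod_cast congrArg (Nat.cast : Nat → Int) this
  have hcard : cols.toFinset.card = (PySem.Set.ofList cols).length := by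
    rw [← hT]
    exact List.toFinset_card_of_nodup (PySem.Set.nodup_ofList cols)
  rw [hcnt, hcard]

-- ===== VERDICT (by name: the statement is the Claim_ definition above) =====
theorem count_doubled_pawns_spec : Claim_equal_count_doubled_pawns := by
  intro pawns _
  unfold Spec_count_doubled_pawns count_doubled_pawns count_doubled_pawns_alt
  simp only []
  rw [pvA_eq_sum, zero_add, pvSum_range_eq (pawns.map (fun p => p.2))
      ((pawns.map (fun p => p.2)).filter (fun c => decide (0 ≤ c) && decide (c < 8)))
      ?_ ?_, pvSum_counts]
  · intro k h0 h8
    rw [List.count_filter]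
    simp [h0, h8]
  · intro k hk
    have := List.of_mem_filter hk
    simp at this; exact this
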